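-- pv_equiv track=rewrite | github.com/kowdin/bin_packing_monodimentionnel_2 | code/lagrange.py | calc_nu_mu_acc
-- ===== SOURCE A (Python) =====
-- def calc_nu_mu_acc(n,m,c,s,x):
-- 	acc = 0
-- 	for b in range(0,m):
-- 		tmp = c
-- 		for p in range(b,n):
-- 			tmp -= s[p]*x[p][b]
-- 		acc += tmp*tmp
-- 	return acc
-- ===== SOURCE B (Python) =====
-- def calc_nu_mu_acc(n, m, c, s, x):
--     # Row-major single pass with a vector of column accumulators.
--     tmp = [c] * m
--     if not tmp:
--         return 0
--     for p in range(n):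
--         for b in range(min(p + 1, m)):
--             tmp[b] -= s[p] * x[p][b]
--     return sum(t * t for t in tmp)
-- ===== Notes on version B (the rewrite author's own statement) =====
-- stated objective: alternative
-- what changed: Replaces the column-major double loop (which rescans the rows for every column) by a single row-major pass maintaining a vector of m column accumulators, then sums the squares at the end.
import Mathlib
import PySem

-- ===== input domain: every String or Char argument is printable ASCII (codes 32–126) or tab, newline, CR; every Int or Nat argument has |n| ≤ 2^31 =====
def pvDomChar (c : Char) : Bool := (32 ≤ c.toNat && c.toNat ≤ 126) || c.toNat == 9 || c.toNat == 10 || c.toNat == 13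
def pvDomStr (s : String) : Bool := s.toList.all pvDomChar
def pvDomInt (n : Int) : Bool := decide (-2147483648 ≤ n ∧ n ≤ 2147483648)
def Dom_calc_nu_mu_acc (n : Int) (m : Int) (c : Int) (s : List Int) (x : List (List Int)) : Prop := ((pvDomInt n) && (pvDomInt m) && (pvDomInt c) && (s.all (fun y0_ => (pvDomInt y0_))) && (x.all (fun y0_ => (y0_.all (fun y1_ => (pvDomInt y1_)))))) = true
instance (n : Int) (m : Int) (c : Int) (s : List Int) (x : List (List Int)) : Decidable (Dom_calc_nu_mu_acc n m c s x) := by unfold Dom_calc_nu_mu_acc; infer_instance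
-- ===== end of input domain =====

-- B replaces A's column-major double loop by one row-major pass over a vector of column accumulators (alternative decomposition, same cost).

-- ===== PORT A =====
-- s[p]*x[p][b], total form; exact under Pre_ (all indices read there are in range)
def pvTerm (s : List Int) (x : List (List Int)) (p : Int) (b : Int) : Int :=
  PySem.List.pyGetD s p 0 * PySem.List.pyGetD (PySem.List.pyGetD x p []) b 0

def calc_nu_mu_acc (n : Int) (m : Int) (c : Int) (s : List Int) (x : List (List Int)) : Int :=
  (PySem.List.pyRange 0 m 1).foldl (fun acc b =>
    let tmp := (PySem.List.pyRange b n 1).foldl (fun tmp p => tmp - pvTerm s x p b) c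
    acc + tmp * tmp) 0

-- ===== PORT B =====
def calc_nu_mu_acc_alt (n : Int) (m : Int) (c : Int) (s : List Int) (x : List (List Int)) : Int :=
  let tmp0 : List Int := List.replicate m.toNat c      -- [c] * m
  if tmp0.isEmpty then 0 else
  let tmp := (PySem.List.pyRange 0 n 1).foldl (fun tmp p =>
    (PySem.List.pyRange 0 (min (p + 1) m) 1).foldl (fun tmp b =>
      PySem.List.pySetD tmp b (PySem.List.pyGetD tmp b 0 - pvTerm s x p b)) tmp) tmp0
  tmp.foldl (fun a t => a + t * t) 0

-- ===== PRECONDITION & SPEC =====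
-- Pre_ excludes exactly the inputs where Python A raises IndexError: when both loops run
-- (0 < m and 0 < n) it reads s[p], x[p] for p < n and x[p][b] for b < min(p+1, m).
def Pre_calc_nu_mu_acc (n : Int) (m : Int) (c : Int) (s : List Int) (x : List (List Int)) : Prop :=
  0 < m → 0 < n →
    (n ≤ (s.length : Int) ∧ n ≤ (x.length : Int) ∧
     ∀ p ∈ List.range n.toNat, min (p + 1) m.toNat ≤ (x.getD p []).length)
instance (n : Int) (m : Int) (c : Int) (s : List Int) (x : List (List Int)) : Decidable (Pre_calc_nu_mu_acc n m c s x) := by unfold Pre_calc_nu_mu_acc; infer_instance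

def pvWitness_calc_nu_mu_acc : Int × Int × Int × List Int × List (List Int) :=
  (2, 2, 3, [1, 2], [[1, 1], [1, 1]])

def Spec_calc_nu_mu_acc (n : Int) (m : Int) (c : Int) (s : List Int) (x : List (List Int)) (out : Int) : Prop := out = calc_nu_mu_acc_alt n m c s x
instance (n : Int) (m : Int) (c : Int) (s : List Int) (x : List (List Int)) (out : Int) : Decidable (Spec_calc_nu_mu_acc n m c s x out) := by unfold Spec_calc_nu_mu_acc; infer_instance

-- ===== CLAIM (what is proved, stated in full; the proofs are below) =====
def Claim_equal_calc_nu_mu_acc : Prop := ∀ (n : Int) (m : Int) (c : Int) (s : List Int) (x : List (List Int)), Dom_calc_nu_mu_acc n m c s x → Pre_calc_nu_mu_acc n m c s x → Spec_calc_nu_mu_acc n m c s x (calc_nu_mu_acc n m c s x)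

-- ===== LEMMAS AND PROOFS =====

theorem foldl_sub_eq_sum (l : List Int) (c : Int) (f : Int → Int) :
    l.foldl (fun t p => t - f p) c = c - (l.map f).sum := by
  induction l generalizing c with
  | nil => simp
  | cons a l ih => simp [List.foldl_cons, ih]; ring

theorem pyRange_zero_toNat (n : Int) :
    PySem.List.pyRange 0 n 1 = PySem.List.pyRange 0 (n.toNat : Int) 1 := by
  by_cases h : n ≤ 0
  · rw [PySem.List.pyRange_one_eq_nil h, PySem.List.pyRange_one_eq_nil (by omega)]
  · congr 1; omega

theorem pyRange_toNat (b n : Int) (hb : 0 ≤ b) :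
    PySem.List.pyRange b n 1 = PySem.List.pyRange b (n.toNat : Int) 1 := by
  by_cases h : n ≤ 0
  · rw [PySem.List.pyRange_one_eq_nil (by omega), PySem.List.pyRange_one_eq_nil (by omega)]
  · congr 1; omega

theorem sum_range_split (b : Nat) (nN : Nat) (g : Int → Int) :
    ((PySem.List.pyRange (b : Int) (nN : Int) 1).map g).sum
      = ((PySem.List.pyRange 0 (nN : Int) 1).map (fun p => if (b : Int) ≤ p then g p else 0)).sum := by
  by_cases h : (nN : Int) ≤ (b : Int)
  · rw [PySem.List.pyRange_one_eq_nil h]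
    simp only [List.map_nil, List.sum_nil]
    symm
    apply List.sum_eq_zero
    intro y hy
    simp only [List.mem_map] at hy
    obtain ⟨p, hp, rfl⟩ := hy
    rw [PySem.List.mem_pyRange_one] at hp
    rw [if_neg (by omega)]
  · rw [PySem.List.pyRange_one_append 0 (b : Int) (nN : Int) (by omega) (by omega)]
    rw [List.map_append, List.sum_append]
    have h1 : ((PySem.List.pyRange 0 (b : Int) 1).map (fun p => if (b : Int) ≤ p then g p else 0)).sum = 0 := by
      apply List.sum_eq_zero
      intro y hy
      simp only [List.mem_map] at hy
      obtain ⟨p, hp, rfl⟩ := hy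
      rw [PySem.List.mem_pyRange_one] at hp
      rw [if_neg (by omega)]
    have h2 : (PySem.List.pyRange (b : Int) (nN : Int) 1).map (fun p => if (b : Int) ≤ p then g p else 0)
        = (PySem.List.pyRange (b : Int) (nN : Int) 1).map g := by
      apply List.map_congr_left
      intro p hp
      rw [PySem.List.mem_pyRange_one] at hp
      rw [if_pos (by omega)]
    rw [h1, h2]; ring

-- One inner pass (row p) on a state of shape 'map over range mN' updates the first k entries.
theorem inner_pass (k mN : Nat) (hk : k ≤ mN) (f d : Int → Int) :
    (PySem.List.pyRange 0 (k : Int) 1).foldl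
        (fun tmp b => PySem.List.pySetD tmp b (PySem.List.pyGetD tmp b 0 - d b))
        ((List.range mN).map (fun (j : Nat) => f (j : Int)))
      = (List.range mN).map (fun (j : Nat) => if j < k then f (j : Int) - d (j : Int) else f (j : Int)) := by
  induction k with
  | zero =>
    rw [PySem.List.pyRange_one_eq_nil (by omega)]
    simp only [List.foldl_nil, Nat.not_lt_zero, if_false]
  | succ k ih =>
    have hsr : PySem.List.pyRange 0 ((k + 1 : Nat) : Int) 1
        = PySem.List.pyRange 0 (k : Int) 1 ++ [(k : Int)] := by
      have h : ((k + 1 : Nat) : Int) = (k : Int) + 1 := by omega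
      rw [h, PySem.List.pyRange_one_succ_right (by omega)]
    rw [hsr, List.foldl_append, ih (by omega)]
    simp only [List.foldl_cons, List.foldl_nil]
    have hget : PySem.List.pyGetD
        ((List.range mN).map (fun (j : Nat) => if j < k then f (j : Int) - d (j : Int) else f (j : Int))) (k : Int) 0
        = f (k : Int) := by
      rw [PySem.List.pyGetD_natCast]
      rw [List.getD_eq_getElem?_getD, List.getElem?_map, List.getElem?_range (by omega)]
      simp
    rw [hget, PySem.List.pySetD_natCast]
    apply List.ext_getElem
    · simp
    · intro i h1 h2
      simp only [List.getElem_set, List.getElem_map, List.getElem_range]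
      by_cases hik : k = i
      · subst hik
        rw [if_pos rfl, if_pos (by omega)]
      · rw [if_neg hik]
        by_cases hlt : i < k
        · rw [if_pos hlt, if_pos (by omega)]
        · rw [if_neg hlt, if_neg (by omega)]

-- After processing rows 0..nK-1, accumulator j holds c minus its partial sum.
theorem outer_pass (nK : Nat) (m c : Int) (s : List Int) (x : List (List Int)) :
    (PySem.List.pyRange 0 (nK : Int) 1).foldl
        (fun tmp p =>
          (PySem.List.pyRange 0 (min (p + 1) m) 1).foldl
            (fun tmp b => PySem.List.pySetD tmp b (PySem.List.pyGetD tmp b 0 - pvTerm s x p b)) tmp)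
        (List.replicate m.toNat c)
      = (List.range m.toNat).map (fun (j : Nat) =>
          c - ((PySem.List.pyRange 0 (nK : Int) 1).map
                (fun p => if (j : Int) ≤ p then pvTerm s x p (j : Int) else 0)).sum) := by
  induction nK with
  | zero =>
    rw [PySem.List.pyRange_one_eq_nil (by omega)]
    simp only [List.foldl_nil, List.map_nil, List.sum_nil]
    apply List.ext_getElem
    · simp
    · intro i h1 h2
      simp [List.getElem_replicate]
  | succ nK ih =>
    have hsr : PySem.List.pyRange 0 ((nK + 1 : Nat) : Int) 1
        = PySem.List.pyRange 0 (nK : Int) 1 ++ [(nK : Int)] := by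
      have h : ((nK + 1 : Nat) : Int) = (nK : Int) + 1 := by omega
      rw [h, PySem.List.pyRange_one_succ_right (by omega)]
    rw [hsr, List.foldl_append, ih]
    simp only [List.foldl_cons, List.foldl_nil]
    by_cases hm : m ≤ 0
    · -- m ≤ 0: both sides are maps over the empty range
      have h0 : m.toNat = 0 := by omega
      rw [PySem.List.pyRange_one_eq_nil (le_trans (min_le_right _ _) hm)]
      simp [h0]
    · have hK : min ((nK : Int) + 1) m = ((min (nK + 1) m.toNat : Nat) : Int) := by omega
      rw [hK,
        inner_pass (min (nK + 1) m.toNat) m.toNat (by omega)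
          (fun j => c - ((PySem.List.pyRange 0 (nK : Int) 1).map
              (fun p => if j ≤ p then pvTerm s x p j else 0)).sum)
          (fun b => pvTerm s x (nK : Int) b)]
      apply List.map_congr_left
      intro j hj
      rw [List.mem_range] at hj
      rw [List.map_append, List.sum_append]
      simp only [List.map_cons, List.map_nil, List.sum_cons, List.sum_nil]
      by_cases hle : (j : Int) ≤ (nK : Int)
      · rw [if_pos (by omega), if_pos hle]
        ring
      · rw [if_neg (by omega), if_neg hle]
        ring

theorem foldl_sq (l : List Int) (a : Int) :
    l.foldl (fun a t => a + t * t) a = a + (l.map (fun t => t * t)).sum := by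
  induction l generalizing a with
  | nil => simp
  | cons t l ih => simp [List.foldl_cons, ih]; ring

theorem foldl_addsq_gen (n : Int) (c : Int) (s : List Int) (x : List (List Int)) (l : List Int) (acc : Int) :
    l.foldl (fun acc b =>
        acc + ((PySem.List.pyRange b n 1).foldl (fun tmp p => tmp - pvTerm s x p b) c)
            * ((PySem.List.pyRange b n 1).foldl (fun tmp p => tmp - pvTerm s x p b) c)) acc
      = acc + (l.map (fun b =>
          ((PySem.List.pyRange b n 1).foldl (fun tmp p => tmp - pvTerm s x p b) c)
          * ((PySem.List.pyRange b n 1).foldl (fun tmp p => tmp - pvTerm s x p b) c))).sum := by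
  induction l generalizing acc with
  | nil => simp
  | cons b l ih => simp only [List.foldl_cons, List.map_cons, List.sum_cons, ih]; ring

-- ===== VERDICT (by name: the statement is the Claim_ definition above) =====
theorem calc_nu_mu_acc_spec : Claim_equal_calc_nu_mu_acc := by
  unfold Claim_equal_calc_nu_mu_acc
  intro n m c s x _ _
  unfold Spec_calc_nu_mu_acc calc_nu_mu_acc calc_nu_mu_acc_alt
  dsimp only
  by_cases hm0 : m.toNat = 0
  · -- no columns: A's outer loop is empty, B returns 0 from its early exit
    rw [PySem.List.pyRange_one_eq_nil (show m ≤ (0:Int) by omega)]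
    simp [hm0]
  · rw [if_neg (by simp [hm0])]
    rw [pyRange_zero_toNat n, outer_pass n.toNat m c s x, foldl_sq]
    rw [pyRange_zero_toNat m, PySem.List.pyRange_one 0 ((m.toNat : Nat) : Int)]
    rw [foldl_addsq_gen]
    simp only [Int.sub_zero, Int.toNat_natCast, zero_add, List.map_map, Function.comp_def]
    congr 1
    apply List.map_congr_left
    intro j hj
    rw [List.mem_range] at hj
    rw [foldl_sub_eq_sum, pyRange_toNat (j : Int) n (by omega),
      sum_range_split j n.toNat (fun p => pvTerm s x p (j : Int))]
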